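-- pv_equiv track=rewrite | github.com/agh-bit-academy/SummerProject2022 | WDI/Zestaw_4/Zadanie_18/sol.py | sum_vertically
-- ===== SOURCE A (Python) =====
-- def sum_vertically(A):
--     max_sum = 0
--     sum_prefix_v = [[A[i][j] for j in range(len(A[0]))] for i in range(len(A))]
--     for j in range(len(A[0])):
--         for i in range(1, len(A)):
--             sum_prefix_v[i][j] += sum_prefix_v[i - 1][j]
--
--     if len(A) <= 10:
--         for j in range(len(A[0])):
--             max_sum = max(max_sum, sum_prefix_v[len(A) - 1][j])
--     else:
--         for j in range(len(A[0])):
--             max_sum = max(max_sum, sum_prefix_v[9][j])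
--             for i in range(10, len(A)):
--                 max_sum = max(max_sum, sum_prefix_v[i][j] - sum_prefix_v[i - 10][j])
--     return max_sum
-- ===== SOURCE B (Python) =====
-- def sum_vertically(A):
--     w = min(10, len(A))
--     best = 0
--     for j in range(len(A[0])):
--         s = sum(A[i][j] for i in range(w))
--         best = max(best, s)
--         for i in range(w, len(A)):
--             s += A[i][j] - A[i - w][j]
--             best = max(best, s)
--     return best
-- ===== Notes on version B (the rewrite author's own statement) =====
-- stated objective: simpler
-- what changed: Replaces the full prefix-sum matrix and the len<=10 / len>10 case split by a single sliding-window pass per column with window size w = min(10, len(A)), using O(1) extra space.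
import Mathlib
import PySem

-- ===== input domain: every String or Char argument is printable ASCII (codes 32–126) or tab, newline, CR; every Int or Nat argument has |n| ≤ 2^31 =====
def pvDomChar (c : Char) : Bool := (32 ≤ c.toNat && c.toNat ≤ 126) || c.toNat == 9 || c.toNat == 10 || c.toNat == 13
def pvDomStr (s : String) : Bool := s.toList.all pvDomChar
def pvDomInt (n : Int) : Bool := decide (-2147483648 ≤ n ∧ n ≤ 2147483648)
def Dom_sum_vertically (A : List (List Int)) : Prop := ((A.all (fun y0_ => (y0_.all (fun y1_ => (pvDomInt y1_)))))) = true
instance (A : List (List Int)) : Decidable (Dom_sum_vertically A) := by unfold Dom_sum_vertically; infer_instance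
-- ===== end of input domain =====

-- B replaces A's full prefix-sum matrix and its len<=10 / len>10 case split by one
-- sliding-window pass per column (window w = min(10, len(A))), O(1) extra space.

-- ===== PORT A =====
-- pvColD A i j models the Python read A[i][j]; on Pre_ inputs every read the
-- algorithm performs is in range, so the default 0 is never returned there.
def pvColD (A : List (List Int)) (i j : Nat) : Int := (A.getD i []).getD j 0

-- the list-of-lists matrix is represented as an index function; pvSet models the
-- in-place assignment sum_prefix_v[i][j] = v (entries outside the built ranges are never read)
def pvSet (f : Nat → Nat → Int) (i j : Nat) (v : Int) : Nat → Nat → Int :=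
  fun i' j' => if i' = i ∧ j' = j then v else f i' j'

def sum_vertically (A : List (List Int)) : Int :=
  let n := A.length
  let m := (A.headD []).length
  -- sum_prefix_v = [[A[i][j] for j ...] for i ...]
  let P0 : Nat → Nat → Int := fun i j => pvColD A i j
  -- for j in range(len(A[0])): for i in range(1, len(A)): P[i][j] += P[i-1][j]
  let P := (List.range m).foldl (fun P j =>
            (List.range' 1 (n - 1)).foldl (fun P i => pvSet P i j (P i j + P (i - 1) j)) P) P0
  if n ≤ 10 then
    (List.range m).foldl (fun acc j => max acc (P (n - 1) j)) 0
  else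
    (List.range m).foldl (fun acc j =>
      (List.range' 10 (n - 10)).foldl (fun acc i => max acc (P i j - P (i - 10) j))
        (max acc (P 9 j))) 0

-- ===== PORT B =====
def sum_vertically_alt (A : List (List Int)) : Int :=
  let n := A.length
  let w := min 10 n
  let m := (A.headD []).length
  (List.range m).foldl (fun best j =>
    let s := (List.range w).foldl (fun s i => s + pvColD A i j) 0
    let best := max best s
    ((List.range' w (n - w)).foldl
      (fun (p : Int × Int) i =>
        let s' := p.2 + pvColD A i j - pvColD A (i - w) j
        (max p.1 s', s')) (best, s)).1) 0

-- ===== PRECONDITION & SPEC =====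
-- Pre_ excludes exactly the inputs where the Python A raises IndexError:
-- empty A (A[0] fails) and matrices with a row shorter than row 0 (A[i][j] fails).
def Pre_sum_vertically (A : List (List Int)) : Prop :=
  A ≠ [] ∧ ∀ r ∈ A, (A.headD []).length ≤ r.length
instance (A : List (List Int)) : Decidable (Pre_sum_vertically A) := by
  unfold Pre_sum_vertically; infer_instance

def pvWitness_sum_vertically : List (List Int) := [[1, -2], [3, 4], [0, 5]]

def Spec_sum_vertically (A : List (List Int)) (out : Int) : Prop := out = sum_vertically_alt A
instance (A : List (List Int)) (out : Int) : Decidable (Spec_sum_vertically A out) := by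
  unfold Spec_sum_vertically; infer_instance

-- ===== CLAIM (what is proved, stated in full; the proofs are below) =====
def Claim_equal_sum_vertically : Prop := ∀ (A : List (List Int)), Dom_sum_vertically A → Pre_sum_vertically A → Spec_sum_vertically A (sum_vertically A)

-- ===== LEMMAS AND PROOFS =====

-- prefix sum of column j over the first k rows
def pvPref (A : List (List Int)) (j k : Nat) : Int :=
  (List.range k).foldl (fun s i => s + pvColD A i j) 0

theorem pvPref_succ (A : List (List Int)) (j k : Nat) :
    pvPref A j (k + 1) = pvPref A j k + pvColD A k j := by
  simp [pvPref, List.range_succ]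

theorem pvPref_zero (A : List (List Int)) (j : Nat) : pvPref A j 0 = 0 := rfl

-- inner loop of A's prefix pass: column j becomes its prefix sums up to row t, other columns untouched
theorem pv_inner_char (A : List (List Int)) (j : Nat) (t : Nat) (f : Nat → Nat → Int)
    (hf : ∀ i, f i j = pvColD A i j) :
    (∀ i, ((List.range' 1 t).foldl (fun P i => pvSet P i j (P i j + P (i - 1) j)) f) i j
        = if i ≤ t then pvPref A j (i + 1) else pvColD A i j) ∧
    (∀ i j', j' ≠ j → ((List.range' 1 t).foldl (fun P i => pvSet P i j (P i j + P (i - 1) j)) f) i j' = f i j') := by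
  induction t with
  | zero =>
    refine ⟨fun i => ?_, fun i j' _ => rfl⟩
    cases i with
    | zero => simp [hf 0, pvPref_succ, pvPref_zero]
    | succ k => simp [hf]
  | succ t ih =>
    have hcat : List.range' 1 (t + 1) = List.range' 1 t ++ [1 + t] := by
      rw [List.range'_concat]; norm_num
    rw [hcat, List.foldl_append, List.foldl_cons, List.foldl_nil]
    obtain ⟨h1, h2⟩ := ih
    constructor
    · intro i
      simp only [pvSet]
      by_cases hi : i = 1 + t
      · subst hi
        have e1 : (1 + t : Nat) - 1 = t := by omega
        rw [if_pos (show (1 + t = 1 + t ∧ True) from ⟨rfl, trivial⟩)]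
        rw [e1, h1 (1 + t), h1 t, if_neg (by omega), if_pos (le_refl t), if_pos (by omega)]
        have : (1 + t) + 1 = (t + 1) + 1 := by omega
        rw [this, pvPref_succ A j (t + 1)]
        have : (1 + t) = t + 1 := by omega
        rw [this]; ring
      · rw [if_neg (by tauto), h1 i]
        by_cases hle : i ≤ t
        · rw [if_pos hle, if_pos (by omega)]
        · rw [if_neg hle, if_neg (by omega)]
    · intro i j' hj'
      simp only [pvSet]
      rw [if_neg (by tauto), h2 i j' hj']

-- A's whole prefix pass: every processed entry is a column prefix sum
theorem pv_outer_char (A : List (List Int)) (m : Nat) :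
    ∀ i j, ((List.range m).foldl (fun P j =>
        (List.range' 1 (A.length - 1)).foldl (fun P i => pvSet P i j (P i j + P (i - 1) j)) P)
        (fun i j => pvColD A i j)) i j
      = if j < m ∧ i ≤ A.length - 1 then pvPref A j (i + 1) else pvColD A i j := by
  induction m with
  | zero => intro i j; simp
  | succ m ih =>
    intro i j
    rw [List.range_succ, List.foldl_append, List.foldl_cons, List.foldl_nil]
    set Pm := ((List.range m).foldl (fun P j =>
        (List.range' 1 (A.length - 1)).foldl (fun P i => pvSet P i j (P i j + P (i - 1) j)) P)
        (fun i j => pvColD A i j)) with hPm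
    have hf : ∀ i, Pm i m = pvColD A i m := by
      intro i; rw [ih i m, if_neg (by omega)]
    obtain ⟨h1, h2⟩ := pv_inner_char A m (A.length - 1) Pm hf
    by_cases hj : j = m
    · subst hj
      rw [h1 i]
      by_cases hi : i ≤ A.length - 1
      · rw [if_pos hi, if_pos ⟨by omega, hi⟩]
      · rw [if_neg hi, if_neg (by omega)]
    · rw [h2 i j hj, ih i j]
      by_cases hjm : j < m
      · by_cases hi : i ≤ A.length - 1
        · rw [if_pos ⟨hjm, hi⟩, if_pos ⟨by omega, hi⟩]
        · rw [if_neg (by tauto), if_neg (by tauto)]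
      · rw [if_neg (by tauto), if_neg (by omega)]

-- B's sliding loop, in closed form: best-component folds max over the window sums
theorem pv_slide (A : List (List Int)) (j w : Nat) :
    ∀ t a (b : Int), w ≤ a →
    ((List.range' a t).foldl
      (fun (p : Int × Int) i =>
        let s' := p.2 + pvColD A i j - pvColD A (i - w) j
        (max p.1 s', s')) (b, pvPref A j a - pvPref A j (a - w)))
    = (List.foldl max b ((List.range' a t).map (fun i => pvPref A j (i + 1) - pvPref A j (i + 1 - w))),
       pvPref A j (a + t) - pvPref A j (a + t - w)) := by
  intro t
  induction t with
  | zero => intro a b _; simp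
  | succ t ih =>
    intro a b ha
    rw [List.range'_succ, List.foldl_cons, List.map_cons, List.foldl_cons]
    have hc1 : pvColD A a j = pvPref A j (a + 1) - pvPref A j a := by
      rw [pvPref_succ]; ring
    have hc2 : pvColD A (a - w) j = pvPref A j (a - w + 1) - pvPref A j (a - w) := by
      rw [pvPref_succ]; ring
    have hs : pvPref A j a - pvPref A j (a - w) + pvColD A a j - pvColD A (a - w) j
        = pvPref A j (a + 1) - pvPref A j (a + 1 - w) := by
      rw [hc1, hc2]
      have : a + 1 - w = a - w + 1 := by omega
      rw [this]; ring
    simp only [hs]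
    have := ih (a + 1) (max b (pvPref A j (a + 1) - pvPref A j (a + 1 - w))) (by omega)
    rw [this]
    have e1 : a + 1 + t = a + (t + 1) := by omega
    have e2 : a + 1 + t - w = a + (t + 1) - w := by omega
    rw [e1]

-- ===== VERDICT (by name: the statement is the Claim_ definition above) =====
theorem sum_vertically_spec : Claim_equal_sum_vertically := by
  intro A _ hpre
  obtain ⟨hne, -⟩ := hpre
  have hn : 0 < A.length := List.length_pos_iff.mpr hne
  simp only [Spec_sum_vertically, sum_vertically, sum_vertically_alt]
  by_cases h10 : A.length ≤ 10
  · rw [if_pos h10, min_eq_right h10]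
    apply PySem.List.foldl_congr_mem
    intro acc j hj
    have hj' := List.mem_range.mp hj
    simp only [Nat.sub_self, List.range'_zero, List.foldl_nil]
    rw [pv_outer_char, if_pos ⟨hj', le_refl _⟩]
    have h1 : A.length - 1 + 1 = A.length := by omega
    rw [h1]
    rfl
  · rw [if_neg h10, min_eq_left (by omega)]
    apply PySem.List.foldl_congr_mem
    intro acc j hj
    have hj' := List.mem_range.mp hj
    rw [pv_outer_char, if_pos ⟨hj', by omega⟩]
    refine Eq.trans (PySem.List.foldl_congr_mem _ _
      (fun acc i => max acc (pvPref A j (i + 1) - pvPref A j (i + 1 - 10))) _ ?_) ?_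
    · intro acc2 i hi
      have hi' := List.mem_range'_1.mp hi
      rw [pv_outer_char, pv_outer_char, if_pos ⟨hj', by omega⟩, if_pos ⟨hj', by omega⟩]
      have e : i - 10 + 1 = i + 1 - 10 := by omega
      rw [e]
    rw [← List.foldl_map]
    have hs : (List.range 10).foldl (fun s i => s + pvColD A i j) 0
        = pvPref A j 10 - pvPref A j (10 - 10) := by
      simp [pvPref]
    rw [hs, pv_slide A j 10 (A.length - 10) 10 _ (le_refl 10)]
    simp [pvPref]
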